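-- pv_equiv track=rewrite | github.com/noaakayad/Python-Programs | Basic Data Types 2.py | supervision_teams
-- ===== SOURCE A (Python) =====
-- def supervision_teams(team, company_name):
--     """
--     ##############################################################
--     #I have created 2 empty lists, one name first_team that will
--     receive all members at even indices of the team list, and
--     another named second_team that will receive all members at odd
--     indices of the team list.
--
--     Thus, I used one "for i in range" for loop where i is
--     incremented by 2 and starts at 0, and I used an other
--     "for i in range" where i is incremented by 2  but starts at 1.
--
--     Then I return a tuple that has first_team and second_team
--
--     Also, even if I will not lose points for this magic number,
--     I have created the variable 'incremented_by_2' to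
--     avoid the magic numbers issue with gradescope #
--     ##############################################################
--
--     >>> supervision_teams(["p1", "p2", "p3"], "Marina")
--     (['Marina', 'p1', 'p3'], ['p2', 'Marina'])
--     >>> supervision_teams(["p1"], "Marina")
--     (['Marina', 'p1'], ['Marina'])
--     >>> supervision_teams(["p1", "p2", "p3", "p4", "p5", "p6"], "Marina")
--     (['Marina', 'p1', 'p3', 'p5'], ['p2', 'p4', 'p6', 'Marina'])
--
--     # Add your own doctests below
--     >>> supervision_teams([], "Noa")
--     (['Noa'], ['Noa'])
--     >>> supervision_teams(["1", "2", "3", "4"], "Noa")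
--     (['Noa', '1', '3'], ['2', '4', 'Noa'])
--     >>> supervision_teams(["1", "2"], "Noa")
--     (['Noa', '1'], ['2', 'Noa'])
--     """
--
--     first_team = []
--     second_team = []
--
--     first_team.append(company_name)
--
--     increment_by_2 = 2
--
--     for i in range(0, len(team), increment_by_2) :
--         first_team.append(team[i])
--     for i in range(1, len(team), increment_by_2) :
--         second_team.append(team[i])
--
--     second_team.append(company_name)
--
--     return first_team, second_team
-- ===== SOURCE B (Python) =====
-- def supervision_teams(team, company_name):
--     first_team = [company_name]
--     second_team = []
--     for i, member in enumerate(team):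
--         if i % 2 == 0:
--             first_team.append(member)
--         else:
--             second_team.append(member)
--     second_team.append(company_name)
--     return first_team, second_team
-- ===== Notes on version B (the rewrite author's own statement) =====
-- stated objective: simpler
-- what changed: Replaces A's two index-stepped range(…,2) loops (and its empty-list/append scaffolding) with a single enumerate pass that dispatches each member by index parity.
import Mathlib
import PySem

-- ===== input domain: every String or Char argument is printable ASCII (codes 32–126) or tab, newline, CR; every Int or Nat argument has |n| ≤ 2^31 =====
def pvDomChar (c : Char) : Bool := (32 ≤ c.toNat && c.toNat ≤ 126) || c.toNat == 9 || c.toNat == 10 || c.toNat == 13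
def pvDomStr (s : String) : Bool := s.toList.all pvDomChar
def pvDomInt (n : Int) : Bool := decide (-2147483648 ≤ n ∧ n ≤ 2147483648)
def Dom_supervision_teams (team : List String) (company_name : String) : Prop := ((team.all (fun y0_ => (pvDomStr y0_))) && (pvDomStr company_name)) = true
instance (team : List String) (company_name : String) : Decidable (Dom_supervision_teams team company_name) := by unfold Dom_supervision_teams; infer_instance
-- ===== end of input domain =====

-- B replaces the two stepped-range loops with one enumerate pass dispatching on index parity (simpler decomposition).

-- ===== PORT A =====
-- literal port of A: two range(start, len(team), 2) loops appending team[i]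
-- (indices produced by the ranges are always in bounds, so pyGetD's default is never used)
def supervision_teams (team : List String) (company_name : String) : List String × List String :=
  let first_team : List String := []
  let second_team : List String := []
  let first_team := first_team ++ [company_name]
  let increment_by_2 : Int := 2
  let first_team := (PySem.List.pyRange 0 (team.length : Int) increment_by_2).foldl
    (fun acc i => acc ++ [PySem.List.pyGetD team i ""]) first_team
  let second_team := (PySem.List.pyRange 1 (team.length : Int) increment_by_2).foldl
    (fun acc i => acc ++ [PySem.List.pyGetD team i ""]) second_team
  let second_team := second_team ++ [company_name]
  (first_team, second_team)

-- ===== PORT B =====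
-- literal port of B: one fold over enumerate(team), branching on i % 2 == 0
def supervision_teams_alt (team : List String) (company_name : String) : List String × List String :=
  let p := (PySem.List.enumerate team 0).foldl
    (fun p ix => if ix.1 % 2 = 0 then (p.1 ++ [ix.2], p.2) else (p.1, p.2 ++ [ix.2]))
    ([company_name], ([] : List String))
  (p.1, p.2 ++ [company_name])

-- ===== PRECONDITION & SPEC =====
def Spec_supervision_teams (team : List String) (company_name : String) (out : List String × List String) : Prop := out = supervision_teams_alt team company_name
instance (team : List String) (company_name : String) (out : List String × List String) : Decidable (Spec_supervision_teams team company_name out) := by unfold Spec_supervision_teams; infer_instance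

-- ===== CLAIM (what is proved, stated in full; the proofs are below) =====
def Claim_equal_supervision_teams : Prop := ∀ (team : List String) (company_name : String), Dom_supervision_teams team company_name → Spec_supervision_teams team company_name (supervision_teams team company_name)

-- ===== LEMMAS AND PROOFS =====

-- elements at even / odd positions
mutual
def pvEvens : List String → List String
  | [] => []
  | a :: l => a :: pvOdds l
def pvOdds : List String → List String
  | [] => []
  | _ :: l => pvEvens l
end

theorem pyRange_two_nil (a b : Int) (h : b ≤ a) : PySem.List.pyRange a b 2 = [] := by
  rw [PySem.List.pyRange_of_pos _ _ (by norm_num)]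
  rw [if_neg (by omega)]
  simp

theorem pyRange_two_cons (a b : Int) (h : a < b) :
    PySem.List.pyRange a b 2 = a :: PySem.List.pyRange (a + 2) b 2 := by
  rw [PySem.List.pyRange_of_pos _ _ (by norm_num), PySem.List.pyRange_of_pos _ _ (by norm_num)]
  have key : (if a < b then ((b - a + 2 - 1) / 2).toNat else 0)
      = (if a + 2 < b then ((b - (a + 2) + 2 - 1) / 2).toNat else 0) + 1 := by
    split_ifs <;> omega
  rw [key, List.range_succ_eq_map, List.map_cons, List.map_map]
  congr 1
  · norm_num
  · apply List.map_congr_left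
    intro k _
    simp only [Function.comp_apply, Nat.succ_eq_add_one]
    push_cast
    ring

-- A's stepped loop starting at k collects pvEvens of the k-dropped suffix
theorem foldA (team : List String) (k : Nat) (acc : List String) :
    (PySem.List.pyRange (k : Int) (team.length : Int) 2).foldl
      (fun acc i => acc ++ [PySem.List.pyGetD team i ""]) acc
      = acc ++ pvEvens (team.drop k) := by
  by_cases h : k < team.length
  · rw [pyRange_two_cons _ _ (by exact_mod_cast h), List.foldl_cons]
    have h2 : ((k : Int) + 2) = ((k + 2 : Nat) : Int) := by push_cast; ring
    rw [h2, foldA team (k + 2) (acc ++ [PySem.List.pyGetD team (k : Int) ""])]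
    have hget : PySem.List.pyGetD team (k : Int) "" = team[k] := by
      rw [PySem.List.pyGetD_eq_getElem team "" (by omega) (by exact_mod_cast h)]
      simp
    have hdrop : team.drop k = team[k] :: team.drop (k + 1) := List.drop_eq_getElem_cons h
    have hdrop2 : pvEvens (team.drop k) = team[k] :: pvOdds (team.drop (k + 1)) := by
      rw [hdrop, pvEvens]
    have hodd : pvOdds (team.drop (k + 1)) = pvEvens (team.drop (k + 2)) := by
      by_cases h1 : k + 1 < team.length
      · rw [List.drop_eq_getElem_cons h1, pvOdds]
      · have e1 : team.drop (k + 1) = [] := List.drop_eq_nil_of_le (by omega)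
        have e2 : team.drop (k + 2) = [] := List.drop_eq_nil_of_le (by omega)
        rw [e1, e2]
        simp [pvOdds, pvEvens]
    rw [hdrop2, hodd, hget]
    simp
  · rw [pyRange_two_nil _ _ (by exact_mod_cast Nat.le_of_not_lt h)]
    rw [List.drop_eq_nil_of_le (Nat.le_of_not_lt h)]
    simp [pvEvens]
termination_by team.length - k

-- B's enumerate fold, generalized over the start index's parity
theorem foldB (l : List String) (s : Nat) (f g : List String) :
    (PySem.List.enumerate l (s : Int)).foldl
      (fun p ix => if ix.1 % 2 = 0 then (p.1 ++ [ix.2], p.2) else (p.1, p.2 ++ [ix.2]))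
      (f, g)
      = if s % 2 = 0 then (f ++ pvEvens l, g ++ pvOdds l) else (f ++ pvOdds l, g ++ pvEvens l) := by
  induction l generalizing s f g with
  | nil => simp [PySem.List.enumerate_nil, pvEvens, pvOdds]
  | cons a l ih =>
    rw [PySem.List.enumerate_cons, List.foldl_cons]
    have hcast : ((s : Int) + 1) = ((s + 1 : Nat) : Int) := by push_cast; ring
    by_cases hs : s % 2 = 0
    · have : (s : Int) % 2 = 0 := by omega
      rw [if_pos hs]
      simp only [this, hcast, ih]
      have : (s + 1) % 2 ≠ 0 := by omega
      rw [if_neg this]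
      simp [pvEvens, pvOdds]
    · have : ¬ ((s : Int) % 2 = 0) := by omega
      rw [if_neg hs, if_neg this]
      simp only [hcast, ih]
      have : (s + 1) % 2 = 0 := by omega
      rw [if_pos this]
      simp [pvEvens, pvOdds]

theorem pvOdds_eq_evens_drop (team : List String) : pvOdds team = pvEvens (team.drop 1) := by
  cases team <;> simp [pvOdds, pvEvens]

-- ===== VERDICT (by name: the statement is the Claim_ definition above) =====
theorem supervision_teams_spec : Claim_equal_supervision_teams := by
  intro team company_name _
  unfold Spec_supervision_teams supervision_teams supervision_teams_alt
  have hA0 := foldA team 0 [company_name]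
  have hA1 := foldA team 1 []
  have hB := foldB team 0 [company_name] []
  simp only [Nat.cast_zero, Nat.cast_one] at hA0 hA1 hB
  simp only [List.nil_append] at hA0 hA1 hB ⊢
  rw [hA0, hA1, hB]
  simp [pvOdds_eq_evens_drop]
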